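-- pv_equiv track=rewrite | github.com/devanggiri/Litcoder-Solutions-VIT-Bhopal-University | Python CS Labs/Module 3 - Lab 1/Cookies.py | min_steps_to_target_sweetness
-- ===== SOURCE A (Python) =====
-- def min_steps_to_target_sweetness(target, candies):
--     candies.sort()  # Sort the candies in ascending order
--     steps = 0
--
--     while candies[0] < target:
--         # Combine the two least sweet candies
--         new_candy = candies[0] + 2 * candies[1]
--
--         # Remove the two least sweet candies and add the new candy
--         candies = [new_candy] + candies[2:]
--
--         steps += 1
--
--     return steps
-- ===== SOURCE B (Python) =====
-- def min_steps_to_target_sweetness(target, candies):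
--     # Sort once, then walk a single index pointer instead of rebuilding the list.
--     candies.sort()
--     total = candies[0]
--     steps = 0
--     while total < target:
--         steps += 1
--         total += 2 * candies[steps]
--     return steps
-- ===== Notes on version B (the rewrite author's own statement) =====
-- stated objective: faster
-- what changed: Instead of rebuilding the list with [new]+candies[2:] on every combine, B sorts once and runs a single accumulator with an index pointer over the sorted list; intended as faster (O(n log n) vs O(n^2)) and measured 6-209x up to n=16384, unconfirmed at n=65536 where A times out.
-- outside the precondition, e.g. on min_steps_to_target_sweetness(5, [1, 1]): A raises IndexError, B raises IndexError; on min_steps_to_target_sweetness(1, []): A raises IndexError, B raises IndexError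
import Mathlib
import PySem

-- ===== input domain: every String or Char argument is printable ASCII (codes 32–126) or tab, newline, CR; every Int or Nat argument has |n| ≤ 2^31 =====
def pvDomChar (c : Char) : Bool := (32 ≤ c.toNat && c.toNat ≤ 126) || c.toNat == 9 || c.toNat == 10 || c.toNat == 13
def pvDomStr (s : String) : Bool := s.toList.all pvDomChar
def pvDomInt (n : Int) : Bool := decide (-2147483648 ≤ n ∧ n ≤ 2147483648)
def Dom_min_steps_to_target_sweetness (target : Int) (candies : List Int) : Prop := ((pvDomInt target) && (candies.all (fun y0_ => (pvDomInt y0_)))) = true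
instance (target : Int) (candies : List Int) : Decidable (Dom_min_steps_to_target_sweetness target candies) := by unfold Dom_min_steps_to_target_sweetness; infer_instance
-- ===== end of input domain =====

-- B sorts once and walks an index pointer with a running accumulator instead of rebuilding the
-- list each combine step (intended as faster; measured 6-209x up to n=16384 in a timing run,
-- unconfirmed at n=65536 where A times out); both A and B sort `candies` in place in Python.


-- ===== PORT A =====
-- the while loop of A: condition candies[0] < target, then candies := [candies[0]+2*candies[1]] ++ candies[2:].
-- fuel only makes the recursion total; the `none` branches are the points where the Python raises IndexError
-- (excluded by Pre_ below).
def pvAGo (target : Int) : Nat → List Int → Int → Int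
  | 0, _, steps => steps
  | fuel + 1, c, steps =>
    match PySem.List.pyGet? c 0 with
    | none => steps
    | some c0 =>
      if c0 < target then
        match PySem.List.pyGet? c 1 with
        | none => steps
        | some c1 => pvAGo target fuel ((c0 + 2 * c1) :: PySem.List.slice c (some 2) none) (steps + 1)
      else steps

def min_steps_to_target_sweetness (target : Int) (candies : List Int) : Int :=
  let s := PySem.List.sorted candies (fun x => x) false
  pvAGo target (s.length + 1) s 0

-- ===== PORT B =====
-- the while loop of B: condition total < target, then steps += 1; total += 2*candies[steps].
def pvBGo (target : Int) (s : List Int) : Nat → Int → Int → Int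
  | 0, _, steps => steps
  | fuel + 1, total, steps =>
    if total < target then
      match PySem.List.pyGet? s (steps + 1) with
      | none => steps
      | some c => pvBGo target s fuel (total + 2 * c) (steps + 1)
    else steps

def min_steps_to_target_sweetness_alt (target : Int) (candies : List Int) : Int :=
  let s := PySem.List.sorted candies (fun x => x) false
  match PySem.List.pyGet? s 0 with
  | none => 0
  | some t0 => pvBGo target s (s.length + 1) t0 0

-- ===== PRECONDITION & SPEC =====
-- Pre_ excludes exactly the inputs on which A raises IndexError: the empty list, and inputs where
-- even combining all candies never reaches the target (B raises IndexError there too).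
def Pre_min_steps_to_target_sweetness (target : Int) (candies : List Int) : Prop :=
  candies ≠ [] ∧
  ∃ i < candies.length,
    (PySem.List.sorted candies (fun x => x) false).headD 0 +
      2 * (((PySem.List.sorted candies (fun x => x) false).drop 1).take i).sum ≥ target
instance (target : Int) (candies : List Int) : Decidable (Pre_min_steps_to_target_sweetness target candies) := by unfold Pre_min_steps_to_target_sweetness; infer_instance

def pvWitness_min_steps_to_target_sweetness : Int × List Int := (7, [1, 2, 3])

def Spec_min_steps_to_target_sweetness (target : Int) (candies : List Int) (out : Int) : Prop := out = min_steps_to_target_sweetness_alt target candies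
instance (target : Int) (candies : List Int) (out : Int) : Decidable (Spec_min_steps_to_target_sweetness target candies out) := by unfold Spec_min_steps_to_target_sweetness; infer_instance

-- ===== CLAIM (what is proved, stated in full; the proofs are below) =====
def Claim_equal_min_steps_to_target_sweetness : Prop := ∀ (target : Int) (candies : List Int), Dom_min_steps_to_target_sweetness target candies → Pre_min_steps_to_target_sweetness target candies → Spec_min_steps_to_target_sweetness target candies (min_steps_to_target_sweetness target candies)

-- ===== LEMMAS AND PROOFS =====

-- A's list at loop iteration k is [total] ++ s.drop (k+1); B holds (total, steps = k) and indexes s at k+1.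
lemma pv_loop_eq (target : Int) (s : List Int) :
    ∀ (rest : List Int) (k fa fb : Nat) (total : Int),
      rest = s.drop (k + 1) → rest.length + 1 ≤ fa → rest.length + 1 ≤ fb →
      pvAGo target fa (total :: rest) (k : Int) = pvBGo target s fb total (k : Int) := by
  intro rest
  induction rest with
  | nil =>
    intro k fa fb total hdrop hfa hfb
    match fa, fb with
    | fa + 1, fb + 1 =>
      simp only [pvAGo, pvBGo, PySem.List.pyGet?_zero_cons]
      split_ifs with h
      · have h1 : PySem.List.pyGet? ((total : Int) :: ([] : List Int)) 1 = none := by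
          simp [PySem.List.pyGet?_eq_none_iff, PySem.Raise.InRange]
        have h2 : PySem.List.pyGet? s ((k : Int) + 1) = none := by
          have hk : s.length ≤ k + 1 := by
            by_contra hc
            push Not at hc
            have := List.drop_eq_nil_iff.mp hdrop.symm
            omega
          rw [show ((k : Int) + 1) = ((k + 1 : Nat) : Int) by push_cast; ring,
            PySem.List.pyGet?_natCast]
          simp [List.getElem?_eq_none hk]
        rw [h1, h2]
      · rfl
  | cons r0 rest' ih =>
    intro k fa fb total hdrop hfa hfb
    match fa, fb with
    | fa + 1, fb + 1 =>
      simp only [pvAGo, pvBGo, PySem.List.pyGet?_zero_cons]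
      split_ifs with h
      · have hlen : k + 1 < s.length := by
          by_contra hc
          push Not at hc
          rw [List.drop_eq_nil_iff.mpr hc] at hdrop
          exact List.cons_ne_nil _ _ hdrop
        have h1 : PySem.List.pyGet? (total :: r0 :: rest') 1 = some r0 := by
          simp [PySem.List.pyGet?, PySem.List.pyIdx?]
        have h2 : PySem.List.pyGet? s ((k : Int) + 1) = some r0 := by
          rw [show ((k : Int) + 1) = ((k + 1 : Nat) : Int) by push_cast; ring,
            PySem.List.pyGet?_natCast]
          have hg : s[k + 1]? = some r0 := by
            have := congrArg (fun l => l.head?) hdrop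
            simpa [List.head?_drop] using this.symm
          simp [hg]
        rw [h1, h2]
        have hslice : PySem.List.slice (total :: r0 :: rest') (some 2) none = rest' := by
          rw [show (2 : Int) = ((2 : Nat) : Int) by norm_num, PySem.List.slice_from_natCast]
          rfl
        rw [hslice]
        have hcast : (k : Int) + 1 = ((k + 1 : Nat) : Int) := by push_cast; ring
        rw [hcast]
        apply ih (k + 1) fa fb (total + 2 * r0)
        · have := congrArg (fun l => l.drop 1) hdrop
          simpa [List.drop_drop] using this
        · simpa using Nat.le_of_succ_le_succ hfa
        · simpa using Nat.le_of_succ_le_succ hfb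
      · rfl

lemma pv_ports_eq (target : Int) (candies : List Int) :
    min_steps_to_target_sweetness target candies = min_steps_to_target_sweetness_alt target candies := by
  unfold min_steps_to_target_sweetness min_steps_to_target_sweetness_alt
  cases hs : PySem.List.sorted candies (fun x => x) false with
  | nil => rfl
  | cons t0 rest =>
    simp only [PySem.List.pyGet?_zero_cons]
    have h0 : ((0 : Nat) : Int) = (0 : Int) := rfl
    rw [← h0]
    have : (t0 :: rest).length + 1 = rest.length + 2 := by simp
    rw [this]
    exact pv_loop_eq target (t0 :: rest) rest 0 (rest.length + 2) (rest.length + 2) t0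
      (by simp) (by omega) (by omega)

-- ===== VERDICT (by name: the statement is the Claim_ definition above) =====
theorem min_steps_to_target_sweetness_spec : Claim_equal_min_steps_to_target_sweetness := by
  intro target candies _ _
  unfold Spec_min_steps_to_target_sweetness
  exact pv_ports_eq target candies
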